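-- pv_equiv track=rewrite | github.com/FuryMartin/BUAA_Software_Lab | hash_table.py | linear_hash
-- ===== SOURCE A (Python) =====
-- def linear_hash(key_list, length):
--     hash_table = [-1 for i in range(length)]
--     suc_count = 0
--     for key in key_list:
--         H = key % 13
--         for index in range(H,len(hash_table)):
--             suc_count += 1
--             if hash_table[index] == -1:
--                 hash_table[index] = key
--                 break
--     return hash_table, suc_count
-- ===== SOURCE B (Python) =====
-- def linear_hash(key_list, length):
--     # Every probe sequence starts at key % 13, which is below 13, so the probe
--     # scan only ever begins inside the first 13 slots.  Scan that fixed window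
--     # directly (constant work per key) and keep a cursor 'free' for the first
--     # slot at or past 13 not known to be occupied: the cursor only moves
--     # forward, so the whole run is O(n + length) instead of O(n * length).
--     table = [-1] * length
--     boundary = min(13, length)
--     free = 13
--     probes = 0
--     for key in key_list:
--         h = key % 13
--         j = next_free(table, h, boundary)
--         if j < boundary:
--             table[j] = key
--             probes += j - h + 1
--         elif free < length:
--             table[free] = key
--             probes += free - h + 1
--             free = next_free(table, free, length)
--         else:
--             probes += len(range(h, length))    # scanned to the end, all full
--     return table, probes
--
-- def next_free(table, j, stop):
--     while j < stop and table[j] != -1: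
--         j += 1
--     return j
-- ===== Notes on version B (the rewrite author's own statement) =====
-- stated objective: faster
-- what changed: Exploits that every probe starts at key % 13 < 13: B scans only the fixed 13-slot start window per key and keeps a forward-only cursor for the first free slot at or past 13, computing each probe count arithmetically instead of A's rescan of the whole table from the hash index.
import Mathlib
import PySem

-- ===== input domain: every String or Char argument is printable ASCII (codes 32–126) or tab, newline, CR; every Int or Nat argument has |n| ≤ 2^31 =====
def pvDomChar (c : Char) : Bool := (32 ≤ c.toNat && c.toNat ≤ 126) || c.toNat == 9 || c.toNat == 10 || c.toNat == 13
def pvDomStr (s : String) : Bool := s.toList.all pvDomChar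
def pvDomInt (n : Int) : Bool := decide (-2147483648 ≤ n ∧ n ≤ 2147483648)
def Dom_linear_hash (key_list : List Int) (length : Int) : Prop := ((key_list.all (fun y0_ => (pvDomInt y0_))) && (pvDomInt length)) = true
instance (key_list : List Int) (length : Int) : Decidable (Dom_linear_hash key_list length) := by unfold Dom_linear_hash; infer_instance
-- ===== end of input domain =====

-- B scans only the fixed 13-slot start window per key (probes start at key % 13 < 13)
-- and keeps a forward-only cursor for the first free slot at or past 13; objective: faster.

-- ===== PORT A =====
-- inner 'for index in range(H, len(hash_table))' with break; every index probed is in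
-- [0, len), so pyGetD's default is never used (exact there).
def aProbe (key : Int) : List Int → Int → List Int → List Int × Int
  | table, cnt, [] => (table, cnt)
  | table, cnt, i :: rest =>
    if PySem.List.pyGetD table i 0 = -1 then
      (PySem.List.pySetD table i key, cnt + 1)
    else aProbe key table (cnt + 1) rest

def linear_hash (key_list : List Int) (length : Int) : List Int × Int :=
  let init : List Int × Int := ((PySem.List.pyRange 0 length 1).map (fun _ => (-1 : Int)), 0)
  key_list.foldl
    (fun st key =>
      let H := PySem.Int.mod key 13
      aProbe key st.1 st.2 (PySem.List.pyRange H (st.1.length : Int) 1))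
    init

-- ===== PORT B =====
-- helper next_free: 'while j < stop and table[j] != -1: j += 1' (every probed index is
-- in [0, len), so pyGetD's default is never used: exact there)
def nextFree (table : List Int) (j stop : Int) : Int :=
  if _h : j < stop then
    if PySem.List.pyGetD table j 0 ≠ -1 then nextFree table (j + 1) stop else j
  else j
termination_by (stop - j).toNat
decreasing_by omega

-- loop body of B: state (table, free, probes)
def bStep (boundary length : Int) (st : List Int × Int × Int) (key : Int) : List Int × Int × Int :=
  let (table, free, probes) := st
  let H := PySem.Int.mod key 13
  let j := nextFree table H boundary
  if j < boundary then
    (PySem.List.pySetD table j key, free, probes + (j - H + 1))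
  else if free < length then
    (PySem.List.pySetD table free key,
     nextFree (PySem.List.pySetD table free key) free length,
     probes + (free - H + 1))
  else
    (table, free, probes + ((PySem.List.pyRange H length 1).length : Int))

def linear_hash_alt (key_list : List Int) (length : Int) : List Int × Int :=
  let boundary := min 13 length
  let init : List Int × Int × Int := (List.replicate length.toNat (-1), 13, 0)
  let fin := key_list.foldl (bStep boundary length) init
  (fin.1, fin.2.2)

-- ===== PRECONDITION & SPEC =====
def Spec_linear_hash (key_list : List Int) (length : Int) (out : List Int × Int) : Prop := out = linear_hash_alt key_list length
instance (key_list : List Int) (length : Int) (out : List Int × Int) : Decidable (Spec_linear_hash key_list length out) := by unfold Spec_linear_hash; infer_instance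

-- ===== CLAIM (what is proved, stated in full; the proofs are below) =====
def Claim_equal_linear_hash : Prop := ∀ (key_list : List Int) (length : Int), Dom_linear_hash key_list length → Spec_linear_hash key_list length (linear_hash key_list length)

-- ===== LEMMAS AND PROOFS =====

-- internal invariant of B's state: the table has its true size, the cursor sits at or
-- past 13, every slot in [13, free) is occupied, and slot free (if inside) is empty
def BInv (length : Int) (table : List Int) (free : Int) : Prop :=
  (table.length : Int) = max 0 length ∧ 13 ≤ free ∧ free ≤ max 13 length ∧
  (∀ i : Int, 13 ≤ i → i < free → PySem.List.pyGetD table i 0 ≠ -1) ∧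
  (free < length → PySem.List.pyGetD table free 0 = -1)

-- simulation relation between A's state and B's state
def SimInv (length : Int) (stA : List Int × Int) (stB : List Int × Int × Int) : Prop :=
  stA.1 = stB.1 ∧ stA.2 = stB.2.2 ∧ BInv length stB.1 stB.2.1

lemma init_table (length : Int) :
    (PySem.List.pyRange 0 length 1).map (fun _ => (-1 : Int)) =
      List.replicate length.toNat (-1) := by
  rw [PySem.List.pyRange_one]
  simp [List.map_map, List.eq_replicate_iff]

lemma pyGetD_set_ne (xs : List Int) (w i v : Int) (h0w : 0 ≤ w) (_hwl : w < (xs.length : Int))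
    (h0i : 0 ≤ i) (hil : i < (xs.length : Int)) (hne : i ≠ w) :
    PySem.List.pyGetD (PySem.List.pySetD xs w v) i 0 = PySem.List.pyGetD xs i 0 := by
  rw [PySem.List.pySetD_of_nonneg _ _ h0w,
      PySem.List.pyGetD_eq_getElem _ 0 h0i (by simpa using hil),
      PySem.List.pyGetD_eq_getElem _ 0 h0i hil]
  exact List.getElem_set_ne (by omega) _

lemma nf_ge (table : List Int) (stop : Int) : ∀ j, j ≤ nextFree table j stop := by
  intro j
  induction j using nextFree.induct table stop with
  | case1 j h1 h2 ih => rw [nextFree]; simp only [dif_pos h1, if_pos h2]; omega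
  | case2 j h1 h2 => rw [nextFree]; simp [h1, h2]
  | case3 j h1 => rw [nextFree]; simp [h1]

lemma nf_le (table : List Int) (stop : Int) : ∀ j, nextFree table j stop ≤ max j stop := by
  intro j
  induction j using nextFree.induct table stop with
  | case1 j h1 h2 ih => rw [nextFree]; simp only [dif_pos h1, if_pos h2]; omega
  | case2 j h1 h2 => rw [nextFree]; simp [h1, h2]
  | case3 j h1 => rw [nextFree]; simp [h1]

lemma nf_occ (table : List Int) (stop : Int) : ∀ j i, j ≤ i → i < nextFree table j stop →
    PySem.List.pyGetD table i 0 ≠ -1 := by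
  intro j
  induction j using nextFree.induct table stop with
  | case1 j h1 h2 ih =>
    intro i hji hi
    rcases eq_or_lt_of_le hji with rfl | hlt
    · exact h2
    · rw [nextFree] at hi; simp only [dif_pos h1, if_pos h2] at hi
      exact ih i (by omega) hi
  | case2 j h1 h2 =>
    intro i hji hi
    rw [nextFree, dif_pos h1, if_neg h2] at hi
    omega
  | case3 j h1 =>
    intro i hji hi
    rw [nextFree, dif_neg h1] at hi
    omega

lemma nf_free (table : List Int) (stop : Int) : ∀ j, nextFree table j stop < stop →
    PySem.List.pyGetD table (nextFree table j stop) 0 = -1 := by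
  intro j
  induction j using nextFree.induct table stop with
  | case1 j h1 h2 ih =>
    intro h
    rw [nextFree] at h ⊢; simp only [dif_pos h1, if_pos h2] at h ⊢
    exact ih h
  | case2 j h1 h2 =>
    intro h
    rw [nextFree, dif_pos h1, if_neg h2]
    simpa using h2
  | case3 j h1 =>
    intro h
    rw [nextFree, dif_neg h1] at h
    omega

lemma nf_found (table : List Int) (stop : Int) : ∀ (n : Nat) (j r : Int), j ≤ r → r < stop →
    (r - j).toNat = n →
    (∀ i, j ≤ i → i < r → PySem.List.pyGetD table i 0 ≠ -1) →
    PySem.List.pyGetD table r 0 = -1 →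
    nextFree table j stop = r := by
  intro n
  induction n with
  | zero =>
    intro j r hjr hrs hn _ hfree
    have : j = r := by omega
    subst this
    rw [nextFree, dif_pos hrs, if_neg (not_not_intro hfree)]
  | succ n ih =>
    intro j r hjr hrs hn hocc hfree
    have hjlt : j < r := by omega
    rw [nextFree]
    rw [dif_pos (by omega : j < stop), if_pos (hocc j le_rfl hjlt)]
    exact ih (j + 1) r (by omega) hrs (by omega) (fun i h1 h2 => hocc i (by omega) h2) hfree

lemma nf_stop (table : List Int) : ∀ (n : Nat) (j stop : Int), j ≤ stop → (stop - j).toNat = n →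
    (∀ i, j ≤ i → i < stop → PySem.List.pyGetD table i 0 ≠ -1) →
    nextFree table j stop = stop := by
  intro n
  induction n with
  | zero =>
    intro j stop hjs hn _
    have : j = stop := by omega
    subst this
    rw [nextFree]; simp
  | succ n ih =>
    intro j stop hjs hn hocc
    have hjlt : j < stop := by omega
    rw [nextFree]
    rw [dif_pos hjlt, if_pos (hocc j le_rfl hjlt)]
    exact ih (j + 1) stop (by omega) (by omega) (fun i h1 h2 => hocc i (by omega) h2)

-- A's probe loop, characterised by the first free slot at or after j
lemma aProbe_eq (key : Int) (table : List Int) : ∀ (n : Nat) (j cnt : Int), 0 ≤ j →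
    j ≤ (table.length : Int) → ((table.length : Int) - j).toNat = n →
    aProbe key table cnt (PySem.List.pyRange j (table.length : Int) 1) =
    (if nextFree table j (table.length : Int) < (table.length : Int)
     then (PySem.List.pySetD table (nextFree table j (table.length : Int)) key,
           cnt + (nextFree table j (table.length : Int) - j) + 1)
     else (table, cnt + ((table.length : Int) - j))) := by
  intro n
  induction n with
  | zero =>
    intro j cnt h0 hle hn
    have hj : j = (table.length : Int) := by omega
    subst hj
    rw [PySem.List.pyRange_one_eq_nil le_rfl, nextFree,
        dif_neg (lt_irrefl ((table.length : Int)))]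
    simp [aProbe]
  | succ n ih =>
    intro j cnt h0 hle hn
    have hjl : j < (table.length : Int) := by omega
    rw [PySem.List.pyRange_one_cons hjl, aProbe]
    by_cases hfree : PySem.List.pyGetD table j 0 = -1
    · have hnf : nextFree table j (table.length : Int) = j := by
        rw [nextFree, dif_pos hjl, if_neg (not_not_intro hfree)]
      rw [if_pos hfree, hnf, if_pos hjl]
      simp only [Prod.mk.injEq]
      exact ⟨trivial, by omega⟩
    · have hnf : nextFree table j (table.length : Int) =
          nextFree table (j + 1) (table.length : Int) := by
        rw [nextFree, dif_pos hjl, if_pos hfree]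
      rw [if_neg hfree, ih (j + 1) (cnt + 1) (by omega) (by omega) (by omega), hnf]
      by_cases hs : nextFree table (j + 1) (table.length : Int) < (table.length : Int)
      · rw [if_pos hs, if_pos hs]
        simp only [Prod.mk.injEq]
        exact ⟨trivial, by omega⟩
      · rw [if_neg hs, if_neg hs]
        simp only [Prod.mk.injEq]
        exact ⟨trivial, by omega⟩

lemma step_sim (length key : Int) (stA : List Int × Int) (stB : List Int × Int × Int)
    (h : SimInv length stA stB) :
    SimInv length
      (aProbe key stA.1 stA.2 (PySem.List.pyRange (PySem.Int.mod key 13) ((stA.1.length : Int)) 1))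
      (bStep (min 13 length) length stB key) := by
  obtain ⟨table, cnt⟩ := stA
  obtain ⟨tableB, free, probes⟩ := stB
  obtain ⟨hT, hC, hlen, hf13, hfmax, hocc, hfree⟩ := h
  dsimp only at hT hC hlen hf13 hfmax hocc hfree
  subst hT
  subst hC
  have hH0 : 0 ≤ PySem.Int.mod key 13 := PySem.Int.mod_nonneg key (by norm_num)
  have hH13 : PySem.Int.mod key 13 < 13 := PySem.Int.mod_lt key (by norm_num)
  set H := PySem.Int.mod key 13 with hHdef
  set L : Int := (table.length : Int) with hLdef
  have hLmax : L = max 0 length := hlen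
  simp only [bStep, ← hHdef]
  by_cases hHL : L ≤ H
  · -- A's probe range is empty; B hits the full-table branch with zero extra probes
    have hlen13 : length < 13 := by omega
    have hnil : PySem.List.pyRange H L 1 = [] := PySem.List.pyRange_one_eq_nil hHL
    rw [hnil]
    have hw : nextFree table H (min 13 length) = H := by
      rw [nextFree, dif_neg (by omega : ¬ H < min 13 length)]
    rw [hw, if_neg (by omega : ¬ H < min 13 length),
        if_neg (by omega : ¬ free < length)]
    unfold aProbe
    refine ⟨rfl, ?_, hlen, hf13, hfmax, hocc, hfree⟩
    dsimp only
    rw [PySem.List.length_pyRange_one]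
    omega
  · -- H is a real index: characterise A's scan via nextFree
    have hL : L = length := by omega
    have hA := aProbe_eq key table ((L - H).toNat) H cnt hH0 (by omega) rfl
    rw [← hLdef] at hA
    rw [hA]
    set w := nextFree table H (min 13 length) with hwdef
    have hwge : H ≤ w := nf_ge table _ H
    have hwle : w ≤ min 13 length := by
      have := nf_le table (min 13 length) H
      omega
    have hwocc : ∀ i, H ≤ i → i < w → PySem.List.pyGetD table i 0 ≠ -1 :=
      fun i h1 h2 => nf_occ table _ H i h1 h2
    by_cases hwb : w < min 13 length
    · -- free slot inside the start window: both sides fill it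
      have hwfree : PySem.List.pyGetD table w 0 = -1 := nf_free table _ H hwb
      have hfeq : nextFree table H L = w :=
        nf_found table L ((w - H).toNat) H w hwge (by omega) rfl hwocc hwfree
      rw [hfeq, if_pos (by omega : w < L), if_pos hwb]
      refine ⟨rfl, by dsimp only; omega, ?_, hf13, hfmax, ?_, ?_⟩
      · dsimp only
        rw [PySem.List.pySetD_of_nonneg _ _ (by omega : (0:Int) ≤ w)]
        simp only [List.length_set]
        omega
      · dsimp only
        intro i h1 h2
        rw [pyGetD_set_ne table w i key (by omega) (by omega) (by omega) (by omega) (by omega)]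
        exact hocc i h1 h2
      · dsimp only
        intro hfl
        rw [pyGetD_set_ne table w free key (by omega) (by omega) (by omega) (by omega) (by omega)]
        exact hfree hfl
    · -- the start window is full from H on
      have hweq : w = min 13 length := by omega
      rw [if_neg hwb]
      by_cases hfl : free < length
      · -- B fills slot 'free'; A's scan reaches exactly there
        have hb13 : min 13 length = 13 := by omega
        have hfeq : nextFree table H L = free := by
          refine nf_found table L ((free - H).toNat) H free (by omega) (by omega) rfl ?_ (hfree hfl)
          intro i h1 h2
          by_cases hi13 : i < 13
          · exact hwocc i h1 (by omega)
          · exact hocc i (by omega) h2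
        rw [hfeq, if_pos (by omega : free < L), if_pos hfl]
        set table' := PySem.List.pySetD table free key with ht'
        have hlen' : (table'.length : Int) = max 0 length := by
          rw [ht', PySem.List.pySetD_of_nonneg _ _ (by omega : (0:Int) ≤ free)]
          simp only [List.length_set]
          omega
        set free' := nextFree table' free length with hf'
        have hf'ge : free ≤ free' := nf_ge table' length free
        refine ⟨rfl, by dsimp only; omega, hlen', by dsimp only; omega, ?_, ?_, ?_⟩
        · dsimp only
          have := nf_le table' length free
          omega
        · dsimp only
          intro i h1 h2
          by_cases hifree : i < free
          · rw [ht', pyGetD_set_ne table free i key (by omega) (by omega) (by omega) (by omega) (by omega)]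
            exact hocc i h1 hifree
          · exact nf_occ table' length free i (by omega) h2
        · dsimp only
          intro h
          exact nf_free table' length free h
      · -- table full past the window: neither side inserts
        have hfeq : nextFree table H L = L := by
          refine nf_stop table ((L - H).toNat) H L (by omega) rfl ?_
          intro i h1 h2
          by_cases hib : i < min 13 length
          · exact hwocc i h1 (by omega)
          · exact hocc i (by omega) (by omega)
        rw [hfeq, if_neg (by omega : ¬ L < L), if_neg hfl]
        refine ⟨rfl, ?_, hlen, hf13, hfmax, hocc, hfree⟩
        dsimp only
        rw [PySem.List.length_pyRange_one]
        omega

lemma fold_sim (length : Int) : ∀ (keys : List Int) (stA : List Int × Int) (stB : List Int × Int × Int),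
    SimInv length stA stB →
    SimInv length
      (keys.foldl (fun st key =>
        let H := PySem.Int.mod key 13
        aProbe key st.1 st.2 (PySem.List.pyRange H ((st.1.length : Int)) 1)) stA)
      (keys.foldl (bStep (min 13 length) length) stB) := by
  intro keys
  induction keys with
  | nil => intro stA stB h; exact h
  | cons k ks ih =>
    intro stA stB h
    exact ih _ _ (step_sim length k stA stB h)

lemma main_eq (key_list : List Int) (length : Int) :
    linear_hash key_list length = linear_hash_alt key_list length := by
  have hinit : SimInv length ((PySem.List.pyRange 0 length 1).map (fun _ => (-1 : Int)), 0)
      (List.replicate length.toNat (-1), 13, 0) := by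
    refine ⟨init_table length, rfl, ?_, ?_, ?_, ?_, ?_⟩
    · dsimp only; simp; omega
    · dsimp only; omega
    · dsimp only; omega
    · dsimp only; intro i h1 h2; omega
    · dsimp only; intro h
      rw [PySem.List.pyGetD_eq_getElem _ 0 (by norm_num) (by simp; omega)]
      simp
  have hfold := fold_sim length key_list _ _ hinit
  obtain ⟨g1, g2, _⟩ := hfold
  simp only [linear_hash, linear_hash_alt]
  rw [Prod.ext_iff]
  exact ⟨g1, g2⟩

-- ===== VERDICT (by name: the statement is the Claim_ definition above) =====
theorem linear_hash_spec : Claim_equal_linear_hash := by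
  intro key_list length _
  unfold Spec_linear_hash
  exact main_eq key_list length
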